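-- pv_equiv track=rewrite | github.com/berkaysarigul/foundation-nnunet | src/data/rle_contract.py | runs_are_strictly_non_overlapping
-- ===== SOURCE A (Python) =====
-- def runs_are_strictly_non_overlapping(runs: list[tuple[int, int]]) -> bool:
--     """Return True when decoded flat runs are strictly increasing."""
--     previous_end = -1
--     for start, length in runs:
--         if start < 0 or length <= 0:
--             return False
--         if start <= previous_end:
--             return False
--         previous_end = start + length - 1
--     return True
-- ===== SOURCE B (Python) =====
-- def runs_are_strictly_non_overlapping(runs: list[tuple[int, int]]) -> bool:
--     """Return True when decoded flat runs are strictly increasing.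
--
--     Reduction: encode each run (s, l) as the two boundary numbers 2*s and
--     2*s + 2*l - 1 (start and end on a doubled axis, ends shifted by +1).
--     Prepending -1, the runs are valid and strictly non-overlapping exactly
--     when this single flat sequence is strictly increasing:
--       -1 < 2*s0        <=> s0 >= 0
--       2*s < 2*s+2*l-1  <=> l > 0
--       2*e+1 < 2*s'     <=> s' > e  (next start past previous end).
--     """
--     bounds = [-1] + [v for s, l in runs for v in (2 * s, 2 * s + 2 * l - 1)]
--     return all(x < y for x, y in zip(bounds, bounds[1:]))
-- ===== Notes on version B (the rewrite author's own statement) =====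
-- stated objective: alternative
-- what changed: Reduces the check to a single generic strictly-increasing test: each run (s,l) is encoded as two boundary integers 2s and 2s+2l-1 on a doubled axis, -1 is prepended, and B checks that flat sequence is strictly increasing, so all three of A's per-run conditions and its previous_end accumulator disappear.
import Mathlib
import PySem

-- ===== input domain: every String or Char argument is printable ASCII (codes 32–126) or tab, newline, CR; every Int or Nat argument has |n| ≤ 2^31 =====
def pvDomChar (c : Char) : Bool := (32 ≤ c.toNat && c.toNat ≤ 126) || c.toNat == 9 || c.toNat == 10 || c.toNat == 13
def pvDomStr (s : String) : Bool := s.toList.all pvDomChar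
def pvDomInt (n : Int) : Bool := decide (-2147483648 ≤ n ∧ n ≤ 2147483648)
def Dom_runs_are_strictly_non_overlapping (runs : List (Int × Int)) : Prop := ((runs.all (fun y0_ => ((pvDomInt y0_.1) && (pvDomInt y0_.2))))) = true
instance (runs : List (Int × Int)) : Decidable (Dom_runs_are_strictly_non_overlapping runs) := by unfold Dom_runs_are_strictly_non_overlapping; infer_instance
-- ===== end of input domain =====

-- B replaces A's stateful previous_end loop by a reduction: encode each run (s,l)
-- as boundary integers 2s and 2s+2l-1, prepend -1, and test that one flat
-- sequence is strictly increasing (objective: alternative algorithm, same cost).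


-- ===== PORT A =====
-- accumulator loop over the runs, threading previous_end; early return on a bad run
def runsLoopA (previous_end : Int) : List (Int × Int) → Bool
  | [] => true
  | (start, length) :: rest =>
    if start < 0 ∨ length ≤ 0 then false
    else if start ≤ previous_end then false
    else runsLoopA (start + length - 1) rest

def runs_are_strictly_non_overlapping (runs : List (Int × Int)) : Bool :=
  runsLoopA (-1) runs

-- ===== PORT B =====
def runs_are_strictly_non_overlapping_alt (runs : List (Int × Int)) : Bool :=
  let bounds := -1 :: runs.flatMap (fun p => [2 * p.1, 2 * p.1 + 2 * p.2 - 1])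
  (bounds.zip bounds.tail).all (fun q => decide (q.1 < q.2))

-- ===== PRECONDITION & SPEC =====
def Spec_runs_are_strictly_non_overlapping (runs : List (Int × Int)) (out : Bool) : Prop := out = runs_are_strictly_non_overlapping_alt runs
instance (runs : List (Int × Int)) (out : Bool) : Decidable (Spec_runs_are_strictly_non_overlapping runs out) := by unfold Spec_runs_are_strictly_non_overlapping; infer_instance

-- ===== CLAIM (what is proved, stated in full; the proofs are below) =====
def Claim_equal_runs_are_strictly_non_overlapping : Prop := ∀ (runs : List (Int × Int)), Dom_runs_are_strictly_non_overlapping runs → Spec_runs_are_strictly_non_overlapping runs (runs_are_strictly_non_overlapping runs)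

-- ===== LEMMAS AND PROOFS =====

-- the strictly-increasing test B runs on a boundary list
def pairAll (l : List Int) : Bool := (l.zip l.tail).all (fun q => decide (q.1 < q.2))

theorem pairAll_cons_cons (x y : Int) (t : List Int) :
    pairAll (x :: y :: t) = (decide (x < y) && pairAll (y :: t)) := by
  simp [pairAll]

-- A's loop from state prev (with prev ≥ -1, the loop invariant) equals the
-- strictly-increasing test on 2*prev+1 followed by the encoded boundaries.
theorem runsLoopA_eq (runs : List (Int × Int)) : ∀ prev : Int, -1 ≤ prev →
    runsLoopA prev runs =
      pairAll ((2 * prev + 1) :: runs.flatMap (fun p => [2 * p.1, 2 * p.1 + 2 * p.2 - 1])) := by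
  induction runs with
  | nil => intro prev _; rfl
  | cons p rest ih =>
    intro prev hprev
    obtain ⟨s, l⟩ := p
    rw [runsLoopA, List.flatMap_cons]
    simp only [List.cons_append]
    rw [pairAll_cons_cons, pairAll_cons_cons]
    by_cases hv : s < 0 ∨ l ≤ 0
    · rw [if_pos hv]
      rcases hv with hs | hl
      · have : ¬ (2 * prev + 1 < 2 * s) := by omega
        simp [this]
      · have : ¬ (2 * s < 2 * s + 2 * l - 1) := by omega
        simp [this]
    · by_cases hle : s ≤ prev
      · rw [if_neg hv, if_pos hle]
        have : ¬ (2 * prev + 1 < 2 * s) := by omega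
        simp [this]
      · rw [if_neg hv, if_neg hle]
        have hs : (0:Int) ≤ s := by omega
        have hl : (0:Int) < l := by omega
        have h1 : 2 * prev + 1 < 2 * s := by omega
        have h2 : 2 * s < 2 * s + 2 * l - 1 := by omega
        have hrec : -1 ≤ s + l - 1 := by omega
        rw [ih (s + l - 1) hrec]
        have he : 2 * (s + l - 1) + 1 = 2 * s + 2 * l - 1 := by ring
        rw [he]
        simp [h1, h2]

-- ===== VERDICT (by name: the statement is the Claim_ definition above) =====
theorem runs_are_strictly_non_overlapping_spec : Claim_equal_runs_are_strictly_non_overlapping := by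
  intro runs _
  unfold Spec_runs_are_strictly_non_overlapping runs_are_strictly_non_overlapping
    runs_are_strictly_non_overlapping_alt
  rw [runsLoopA_eq runs (-1) (by omega)]
  norm_num [pairAll]
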